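-- pv_equiv track=rewrite | github.com/jimrybarski/piwarmer | backend/device/program.py | _hhmmss_to_seconds
-- ===== SOURCE A (Python) =====
-- def _hhmmss_to_seconds(text):
--     """
--     Converts human-readable times to seconds.
--
--     """
--     if type(text) == int:
--         return text
--     seconds = 0
--     multiplier = 1
--     for val in text.split(':')[::-1]:
--         seconds += int(val) * multiplier
--         multiplier *= 60
--     return seconds
-- ===== SOURCE B (Python) =====
-- def _hhmmss_to_seconds(text):
--     """
--     Converts human-readable times to seconds.
--
--     """
--     if type(text) == int:
--         return text
--     seconds = 0
--     for val in text.split(':'):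
--         seconds = seconds * 60 + int(val)
--     return seconds
-- ===== Notes on version B (the rewrite author's own statement) =====
-- stated objective: simpler
-- what changed: Replaces the reversed traversal with a separate growing multiplier by a single forward pass using Horner's rule (seconds = seconds*60 + int(val)).
import Mathlib
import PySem

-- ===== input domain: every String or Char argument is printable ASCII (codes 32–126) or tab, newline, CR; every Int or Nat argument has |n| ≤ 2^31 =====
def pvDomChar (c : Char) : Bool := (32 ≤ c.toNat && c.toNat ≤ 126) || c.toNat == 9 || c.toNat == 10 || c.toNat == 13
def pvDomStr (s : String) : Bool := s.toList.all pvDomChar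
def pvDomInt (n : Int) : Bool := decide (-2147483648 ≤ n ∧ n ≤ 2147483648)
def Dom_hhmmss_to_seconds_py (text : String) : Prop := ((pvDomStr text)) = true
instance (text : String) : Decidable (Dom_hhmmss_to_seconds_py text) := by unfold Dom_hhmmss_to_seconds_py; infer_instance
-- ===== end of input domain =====

-- B replaces A's reversed traversal with a growing multiplier by a single forward
-- Horner pass (seconds = seconds*60 + int(val)); objective: simpler. Same values everywhere A returns.


-- ===== PORT A =====
-- text is a String here, so the 'type(text) == int' early return never fires; the string
-- path is ported literally: split on ':', reverse via [::-1], accumulate seconds and multiplier.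
-- int(val) is (PySem.Int.ofStr? v).getD 0; Pre_ guarantees every part parses (else Python raises ValueError).
def hhmmss_to_seconds_py (text : String) : Int :=
  let parts : List String :=
    ((PySem.List.slice? ((PySem.Str.split? text ":").getD []) none none (-1)).getD [])
  (parts.foldl
    (fun (st : Int × Int) v => (st.1 + (PySem.Int.ofStr? v).getD 0 * st.2, st.2 * 60))
    (0, 1)).1

-- ===== PORT B =====
def hhmmss_to_seconds_py_alt (text : String) : Int :=
  ((PySem.Str.split? text ":").getD []).foldl
    (fun (s : Int) v => s * 60 + (PySem.Int.ofStr? v).getD 0) 0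

-- ===== PRECONDITION & SPEC =====
-- Pre_ excludes exactly the inputs on which int(val) raises ValueError (some ':'-separated
-- part is not a valid Python integer literal): A raises ValueError there, and so does B.
def Pre_hhmmss_to_seconds_py (text : String) : Prop :=
  (((PySem.Str.split? text ":").getD []).all (fun v => (PySem.Int.ofStr? v).isSome)) = true
instance (text : String) : Decidable (Pre_hhmmss_to_seconds_py text) := by
  unfold Pre_hhmmss_to_seconds_py; infer_instance

def pvWitness_hhmmss_to_seconds_py : String := "1:02:03"

def Spec_hhmmss_to_seconds_py (text : String) (out : Int) : Prop := out = hhmmss_to_seconds_py_alt text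
instance (text : String) (out : Int) : Decidable (Spec_hhmmss_to_seconds_py text out) := by unfold Spec_hhmmss_to_seconds_py; infer_instance

-- ===== CLAIM (what is proved, stated in full; the proofs are below) =====
def Claim_equal_hhmmss_to_seconds_py : Prop := ∀ (text : String), Dom_hhmmss_to_seconds_py text → Pre_hhmmss_to_seconds_py text → Spec_hhmmss_to_seconds_py text (hhmmss_to_seconds_py text)

-- ===== LEMMAS AND PROOFS =====

-- Horner fold from an arbitrary accumulator splits off a * 60^len.
theorem pv_horner_shift (f : String → Int) :
    ∀ (xs : List String) (a : Int),
      xs.foldl (fun s v => s * 60 + f v) a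
        = a * 60 ^ xs.length + xs.foldl (fun s v => s * 60 + f v) 0 := by
  intro xs
  induction xs with
  | nil => intro a; simp
  | cons x xs ih =>
      intro a
      simp only [List.foldl_cons, List.length_cons]
      rw [ih (a * 60 + f x), ih (0 * 60 + f x)]
      ring

-- A's reversed multiplier loop, expressed as a foldr, equals (Horner value, 60^len).
theorem pv_foldr_eq_horner (f : String → Int) :
    ∀ (xs : List String),
      xs.foldr (fun v (p : Int × Int) => (p.1 + f v * p.2, p.2 * 60)) (0, 1)
        = (xs.foldl (fun s v => s * 60 + f v) 0, 60 ^ xs.length) := by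
  intro xs
  induction xs with
  | nil => simp
  | cons x xs ih =>
      simp only [List.foldr_cons, List.foldl_cons, List.length_cons, ih]
      refine Prod.ext ?_ ?_
      · show (xs.foldl (fun s v => s * 60 + f v) 0) + f x * 60 ^ xs.length
            = xs.foldl (fun s v => s * 60 + f v) (0 * 60 + f x)
        rw [pv_horner_shift f xs (0 * 60 + f x)]
        ring
      · show 60 ^ xs.length * 60 = 60 ^ (xs.length + 1)
        rw [pow_succ]

-- ===== VERDICT (by name: the statement is the Claim_ definition above) =====
theorem hhmmss_to_seconds_py_spec : Claim_equal_hhmmss_to_seconds_py := by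
  intro text _ _
  unfold Spec_hhmmss_to_seconds_py hhmmss_to_seconds_py hhmmss_to_seconds_py_alt
  rw [PySem.List.slice?_none_none_neg_one]
  simp only [Option.getD_some, List.foldl_reverse]
  rw [pv_foldr_eq_horner (fun v => (PySem.Int.ofStr? v).getD 0)]
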